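-- pv_equiv track=rewrite | github.com/Naumenko-KM/Yandex_Algorithms | 5I - Робот.py | find_robot_nums
-- ===== SOURCE A (Python) =====
-- def find_robot_nums(K, operations):
--     prev_len = 0
--     num = 0
--     for i in range(K, len(operations)):
--         if operations[i] == operations[i - K]:
--             prev_len += 1
--             num += prev_len
--         else:
--             prev_len = 0
--     return num
-- ===== SOURCE B (Python) =====
-- def find_robot_nums(K, operations):
--     # Breakpoint decomposition: list the positions where the offset comparison
--     # fails (with sentinels), then sum the triangular number of each gap.
--     n = len(operations)
--     if K >= n:
--         return 0
--     breaks = [-1] + [t for t in range(n - K) if operations[t + K] != operations[t]] + [n - K]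
--     return sum((b2 - b1 - 1) * (b2 - b1) // 2 for b1, b2 in zip(breaks, breaks[1:]))
-- ===== Notes on version B (the rewrite author's own statement) =====
-- stated objective: alternative
-- what changed: Replaces A's stateful run-length/score accumulator with a stateless breakpoint decomposition: a comprehension lists the positions where the offset comparison fails (with sentinels -1 and n-K), and the answer is the sum over adjacent breakpoint pairs of the triangular number of the gap.
import Mathlib
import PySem

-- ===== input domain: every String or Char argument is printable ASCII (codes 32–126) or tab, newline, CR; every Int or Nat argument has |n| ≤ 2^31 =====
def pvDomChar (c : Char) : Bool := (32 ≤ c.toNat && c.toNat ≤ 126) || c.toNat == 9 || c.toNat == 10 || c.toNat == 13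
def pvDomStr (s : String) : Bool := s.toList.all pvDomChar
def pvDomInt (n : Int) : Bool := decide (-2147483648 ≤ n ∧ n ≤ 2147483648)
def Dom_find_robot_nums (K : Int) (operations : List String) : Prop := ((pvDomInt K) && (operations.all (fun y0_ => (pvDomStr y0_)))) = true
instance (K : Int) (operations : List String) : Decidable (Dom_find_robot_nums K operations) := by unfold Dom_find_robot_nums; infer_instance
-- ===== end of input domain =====

-- B replaces A's stateful run-length/score accumulator with a stateless breakpoint
-- decomposition: list the mismatch positions (with sentinels), sum triangular numbers of gaps.


-- ===== PORT A =====
-- literal transliteration of A: fold over range(K, len(operations)) with state (prev_len, num)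
def find_robot_nums (K : Int) (operations : List String) : Int :=
  ((PySem.List.pyRange K (operations.length : Int) 1).foldl
    (fun (s : Int × Int) (i : Int) =>
      if PySem.List.pyGetD operations i "" = PySem.List.pyGetD operations (i - K) "" then
        (s.1 + 1, s.2 + (s.1 + 1))
      else
        (0, s.2))
    (0, 0)).2

-- ===== PORT B =====
-- literal transliteration of B: sentinel-bounded breakpoint list, then sum of gap triangles
def find_robot_nums_alt (K : Int) (operations : List String) : Int :=
  let n : Int := operations.length
  if K ≥ n then 0
  else
    let breaks : List Int :=
      [-1] ++ ((PySem.List.pyRange 0 (n - K) 1).filter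
        (fun t => !(PySem.List.pyGetD operations (t + K) "" == PySem.List.pyGetD operations t ""))) ++ [n - K]
    ((breaks.zip (breaks.drop 1)).map
      (fun p => PySem.Int.floordiv ((p.2 - p.1 - 1) * (p.2 - p.1)) 2)).sum

-- ===== PRECONDITION & SPEC =====
-- Pre_ excludes K < 0, on which Python A raises IndexError (operations[i-K] runs past the end).
def Pre_find_robot_nums (K : Int) (operations : List String) : Prop := 0 ≤ K
instance (K : Int) (operations : List String) : Decidable (Pre_find_robot_nums K operations) := by unfold Pre_find_robot_nums; infer_instance
def pvWitness_find_robot_nums : Int × List String := (1, ["a", "a", "a", "b"])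

def Spec_find_robot_nums (K : Int) (operations : List String) (out : Int) : Prop := out = find_robot_nums_alt K operations
instance (K : Int) (operations : List String) (out : Int) : Decidable (Spec_find_robot_nums K operations out) := by unfold Spec_find_robot_nums; infer_instance

-- ===== CLAIM (what is proved, stated in full; the proofs are below) =====
def Claim_equal_find_robot_nums : Prop := ∀ (K : Int) (operations : List String), Dom_find_robot_nums K operations → Pre_find_robot_nums K operations → Spec_find_robot_nums K operations (find_robot_nums K operations)

-- ===== LEMMAS AND PROOFS =====

-- tri L = L*(L+1)//2, the closed form B applies to each gap
def triG (L : Int) : Int := PySem.Int.floordiv (L * (L + 1)) 2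

lemma triG_zero : triG 0 = 0 := by decide

lemma triG_succ (c : Int) : triG (c + 1) = triG c + (c + 1) := by
  obtain ⟨t, ht⟩ := Int.even_mul_succ_self c
  have h1 : c * (c + 1) = 2 * t := by omega
  unfold triG
  rw [show (c + 1) * (c + 1 + 1) = 2 * (t + (c + 1)) by linarith, h1]
  simp only [PySem.Int.floordiv_eq_ediv_of_pos (show (0:Int) < 2 by norm_num)]
  rw [Int.mul_ediv_cancel_left _ two_ne_zero, Int.mul_ediv_cancel_left _ two_ne_zero]

-- recursive characterisation of B's zip/map/sum over adjacent pairs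
def gapSum : List Int → Int
  | [] => 0
  | [_] => 0
  | x :: y :: r => triG (y - x - 1) + gapSum (y :: r)

lemma zip_map_sum_eq_gapSum (l : List Int) :
    ((l.zip (l.drop 1)).map
      (fun p => PySem.Int.floordiv ((p.2 - p.1 - 1) * (p.2 - p.1)) 2)).sum = gapSum l := by
  induction l with
  | nil => rfl
  | cons x r ih =>
    cases r with
    | nil => rfl
    | cons y r' =>
      simp only [List.drop_succ_cons, List.drop_zero, List.zip_cons_cons, List.map_cons,
        List.sum_cons, gapSum]
      rw [← ih]
      simp only [List.drop_succ_cons, List.drop_zero]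
      have : triG (y - x - 1) = PySem.Int.floordiv ((y - x - 1) * (y - x)) 2 := by
        unfold triG; ring_nf
      omega

lemma gapSum_append_last (l : List Int) (b : Int) (h : l ≠ []) :
    gapSum (l ++ [b]) = gapSum l + triG (b - l.getLast h - 1) := by
  induction l with
  | nil => exact absurd rfl h
  | cons x r ih =>
    cases r with
    | nil => simp [gapSum]
    | cons y r' =>
      have hne : (y :: r') ≠ [] := by simp
      simp only [List.cons_append, gapSum]
      rw [show (y :: r') ++ [b] = ((y :: r') ++ [b] : List Int) from rfl] at *
      have := ih hne
      simp only [List.cons_append] at this ⊢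
      rw [this]
      have : (x :: y :: r').getLast h = (y :: r').getLast hne := by
        simp [List.getLast_cons]
      rw [this]
      ring

-- the breakpoint list of the first m relative positions
def brk (operations : List String) (K : Int) (m : Int) : List Int :=
  (-1) :: (PySem.List.pyRange 0 m 1).filter
    (fun t => !(PySem.List.pyGetD operations (t + K) "" == PySem.List.pyGetD operations t ""))

lemma brk_ne_nil (operations : List String) (K m : Int) : brk operations K m ≠ [] := by
  simp [brk]

-- the main invariant: A's fold state after the first m relative steps equals
-- (distance to last breakpoint, gap-triangle sum with closing sentinel m)
lemma fold_eq_brk (operations : List String) (K : Int) (m : Nat) :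
    (PySem.List.pyRange 0 (m : Int) 1).foldl
      (fun (s : Int × Int) (t : Int) =>
        if PySem.List.pyGetD operations (t + K) "" = PySem.List.pyGetD operations t "" then
          (s.1 + 1, s.2 + (s.1 + 1))
        else
          (0, s.2))
      (0, 0)
    = ((m : Int) - (brk operations K m).getLast (brk_ne_nil operations K m) - 1,
       gapSum (brk operations K m ++ [(m : Int)])) := by
  induction m with
  | zero =>
    simp [PySem.List.pyRange_zero_nat, brk, gapSum, triG_zero]
  | succ m ih =>
    have hstep : PySem.List.pyRange 0 ((m : Int) + 1) 1
        = PySem.List.pyRange 0 (m : Int) 1 ++ [(m : Int)] := by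
      exact PySem.List.pyRange_one_succ_right (by positivity)
    have hcast : ((m + 1 : Nat) : Int) = (m : Int) + 1 := by push_cast; ring
    rw [hcast, hstep, List.foldl_append, ih]
    by_cases hc : PySem.List.pyGetD operations ((m : Int) + K) "" = PySem.List.pyGetD operations (m : Int) ""
    · -- match: breakpoint list unchanged, last gap grows by one
      have hbrk : brk operations K ((m : Int) + 1) = brk operations K (m : Int) := by
        simp only [brk, hstep, List.filter_append, List.filter_cons, List.filter_nil]
        rw [if_neg (by simp [PySem.List.pyGetD_natCast, hc])]
        simp
      simp only [List.foldl_cons, List.foldl_nil, if_pos hc]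
      have hgl := brk_ne_nil operations K (m : Int)
      rw [show (gapSum (brk operations K ((m:Int)+1) ++ [(m : Int) + 1])) =
          gapSum (brk operations K (m:Int)) + triG ((m : Int) + 1 - (brk operations K (m:Int)).getLast hgl - 1) by
        rw [hbrk]; exact gapSum_append_last _ _ hgl]
      rw [show (gapSum (brk operations K (m:Int) ++ [(m : Int)])) =
          gapSum (brk operations K (m:Int)) + triG ((m : Int) - (brk operations K (m:Int)).getLast hgl - 1) by
        exact gapSum_append_last _ _ hgl]
      have hgl2 : (brk operations K ((m : Int) + 1)).getLast (brk_ne_nil _ _ _)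
          = (brk operations K (m : Int)).getLast hgl := by
        congr 1 <;> rw [hbrk]
      rw [Prod.mk.injEq]
      constructor
      · rw [hgl2]; ring
      · rw [show (m : Int) + 1 - (brk operations K (m:Int)).getLast hgl - 1
              = ((m : Int) - (brk operations K (m:Int)).getLast hgl - 1) + 1 by ring,
            triG_succ]
        ring
    · -- mismatch: m joins the breakpoint list, new gap is empty
      have hbrk : brk operations K ((m : Int) + 1) = brk operations K (m : Int) ++ [(m : Int)] := by
        simp only [brk, hstep, List.filter_append, List.filter_cons, List.filter_nil]
        rw [if_pos (by simpa [PySem.List.pyGetD_natCast] using hc)]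
        simp
      simp only [List.foldl_cons, List.foldl_nil, if_neg hc]
      have hgl := brk_ne_nil operations K (m : Int)
      have h2 : gapSum (brk operations K (m : Int) ++ [(m : Int)] ++ [(m : Int) + 1])
          = gapSum (brk operations K (m : Int) ++ [(m : Int)])
            + triG ((m : Int) + 1 - (brk operations K (m : Int) ++ [(m : Int)]).getLast (by simp) - 1) :=
        gapSum_append_last _ _ (by simp)
      have h3 : (brk operations K (m : Int) ++ [(m : Int)]).getLast (by simp) = (m : Int) := by
        simp
      have h4 : ∀ (h : brk operations K ((m : Int) + 1) ≠ []),
          (brk operations K ((m : Int) + 1)).getLast h = (m : Int) := by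
        rw [hbrk]; intro _; simp
      rw [Prod.mk.injEq]
      constructor
      · rw [h4 (brk_ne_nil _ _ _)]; ring
      · rw [show brk operations K ((m:Int)+1) ++ [(m : Int) + 1]
            = brk operations K (m:Int) ++ [(m : Int)] ++ [(m : Int) + 1] by rw [hbrk]]
        rw [h2, h3]
        simp [triG_zero]

-- reindex A's range(K, n) to relative positions range(0, n-K)
lemma pyRange_shift (K n : Int) (hK : 0 ≤ n - K) :
    PySem.List.pyRange K n 1 = (PySem.List.pyRange 0 (n - K) 1).map (fun t => t + K) := by
  rw [PySem.List.pyRange_one, PySem.List.pyRange_one]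
  simp only [sub_zero, List.map_map]
  apply List.map_congr_left
  intro k _
  simp [Function.comp]
  ring

-- ===== VERDICT (by name: the statement is the Claim_ definition above) =====
theorem find_robot_nums_spec : Claim_equal_find_robot_nums := by
  intro K operations _ hK
  unfold Spec_find_robot_nums find_robot_nums find_robot_nums_alt
  simp only []
  by_cases hKn : K ≥ (operations.length : Int)
  · rw [if_pos hKn, PySem.List.pyRange_one_eq_nil hKn]
    rfl
  · rw [if_neg hKn]
    push_neg at hKn
    have hK0 : 0 ≤ (operations.length : Int) - K := by omega
    set n : Int := (operations.length : Int) with hn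
    set m : Nat := (n - K).toNat with hm
    have hmc : (m : Int) = n - K := Int.toNat_of_nonneg hK0
    rw [pyRange_shift K n hK0, List.foldl_map]
    have hfun : (fun (s : Int × Int) (t : Int) =>
          if PySem.List.pyGetD operations (t + K) "" = PySem.List.pyGetD operations ((t + K) - K) "" then
            (s.1 + 1, s.2 + (s.1 + 1)) else (0, s.2))
        = (fun (s : Int × Int) (t : Int) =>
          if PySem.List.pyGetD operations (t + K) "" = PySem.List.pyGetD operations t "" then
            (s.1 + 1, s.2 + (s.1 + 1)) else (0, s.2)) := by
      funext s t
      rw [add_sub_cancel_right]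
    rw [hfun]
    rw [← hmc, fold_eq_brk operations K m]
    rw [zip_map_sum_eq_gapSum]
    simp [brk]
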